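-- pv_equiv track=rewrite | github.com/MaluckowD/TinkoffAlgorithms-2025 | entrance exam/D.py | max_balanced_size
-- ===== SOURCE A (Python) =====
-- def max_balanced_size(n, m, k, a, c):
--     # Создаем массив b
--     b = []
--     for i in range(n):
--         b.extend([a[i]] * c[i])
--
--     # Сортируем массив b
--     b.sort()
--
--     # Переменная для хранения максимального суммарного размера
--     max_size = 0
--     # Количество последовательностей, которые мы можем создать
--     sequences = []
--
--     # Ищем места, где можно начать новую последовательность
--     for i in range(len(b)):
--         if not sequences or b[i] - sequences[-1] >= k:
--             # Если можно начать новую последовательность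
--             if len(sequences) < m:
--                 # Создаем новую последовательность
--                 sequences.append(b[i])
--                 if len(sequences) == 1:
--                     # Если это первая последовательность
--                     max_size += c[a.index(b[i])]
--                 else:
--                     # Увеличиваем максимальный размер
--                     max_size += c[a.index(b[i])]
--
--     return max_size
-- ===== SOURCE B (Python) =====
-- def max_balanced_size(n, m, k, a, c):
--     # Greedy over the sorted distinct values instead of the expanded multiset:
--     # a value can be picked iff one of its occurrences has a positive count,
--     # and a pick contributes c at the value's first position in a (a dict of
--     # first positions replaces the repeated a.index scan).
--     first = {}
--     available = set()
--     for i in range(n):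
--         first.setdefault(a[i], i)
--         if c[i] > 0:
--             available.add(a[i])
--     total = 0
--     picks = 0
--     last = None
--     for v in sorted(available):
--         if picks >= m:
--             break
--         if last is None or v - last >= k:
--             total += c[first[v]]
--             last = v
--             picks += 1
--     return total
-- ===== Notes on version B (the rewrite author's own statement) =====
-- stated objective: faster
-- what changed: B never materialises the expanded multiset of size sum(c): one pass records each value's first position (a dict replacing A's repeated a.index scan) and whether any occurrence has a positive count, then the greedy runs over the sorted distinct values; Pre_ excludes n > len(a) or n > len(c) (A raises IndexError) and nonpositive spacing k unless no value can have two copies, where A's repeated same-value picks are an artefact of its expansion outside the problem's natural domain (the task has k >= 1).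
-- outside the precondition, e.g. on max_balanced_size(1, 2, 0, [5], [3]): A returns 6, B returns 3
import Mathlib
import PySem

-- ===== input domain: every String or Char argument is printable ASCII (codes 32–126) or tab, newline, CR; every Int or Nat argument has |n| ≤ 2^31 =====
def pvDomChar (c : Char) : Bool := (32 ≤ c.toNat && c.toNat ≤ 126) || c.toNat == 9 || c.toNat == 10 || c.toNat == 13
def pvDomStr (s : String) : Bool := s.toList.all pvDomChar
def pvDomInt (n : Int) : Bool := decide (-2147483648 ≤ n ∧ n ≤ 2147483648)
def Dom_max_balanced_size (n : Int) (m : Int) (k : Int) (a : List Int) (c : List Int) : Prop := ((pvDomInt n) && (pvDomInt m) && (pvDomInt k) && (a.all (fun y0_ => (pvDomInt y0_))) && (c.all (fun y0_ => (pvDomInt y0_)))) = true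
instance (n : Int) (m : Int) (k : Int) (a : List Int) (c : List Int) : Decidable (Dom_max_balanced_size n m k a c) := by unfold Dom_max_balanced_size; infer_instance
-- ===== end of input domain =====

-- B runs the greedy over the sorted distinct values (availability set + a dict of
-- first positions replacing the repeated a.index scan) instead of A's sort of the
-- whole expanded multiset of Σc elements.

-- ===== PORT A =====
-- b = []; for i in range(n): b.extend([a[i]] * c[i])
def pvA_build (n : Int) (a c : List Int) : List Int :=
  (PySem.List.pyRange 0 n 1).foldl
    (fun b i => b ++ List.replicate (PySem.List.pyGetD c i 0).toNat (PySem.List.pyGetD a i 0)) []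

-- c[a.index(x)]
def pvA_cost (a c : List Int) (x : Int) : Int :=
  PySem.List.pyGetD c (((PySem.List.index? a x).getD 0 : Nat) : Int) 0

-- the body of A's loop over sorted b; state = (max_size, sequences)
def pvA_step (m k : Int) (a c : List Int) (st : Int × List Int) (x : Int) : Int × List Int :=
  if (match st.2.getLast? with
      | none => true
      | some lastv => decide (k ≤ x - lastv)) = true then
    if (st.2.length : Int) < m then
      -- Python's redundant `if len(sequences) == 1` adds the same amount in both branches
      (if (st.2 ++ [x]).length = 1 then st.1 + pvA_cost a c x else st.1 + pvA_cost a c x,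
       st.2 ++ [x])
    else st
  else st

def max_balanced_size (n : Int) (m : Int) (k : Int) (a : List Int) (c : List Int) : Int :=
  ((PySem.List.sorted (pvA_build n a c) (fun x => x)).foldl (pvA_step m k a c) (0, [])).1

-- ===== PORT B =====
-- for i in range(n): first.setdefault(a[i], i); if c[i] > 0: available.add(a[i])
def pvB_loops (n : Int) (a c : List Int) : PySem.Dict Int Int × PySem.Set Int :=
  (PySem.List.pyRange 0 n 1).foldl
    (fun (st : PySem.Dict Int Int × PySem.Set Int) i =>
      ((if st.1.contains (PySem.List.pyGetD a i 0) then st.1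
        else st.1.insert (PySem.List.pyGetD a i 0) i),
       (if 0 < PySem.List.pyGetD c i 0 then PySem.Set.add st.2 (PySem.List.pyGetD a i 0)
        else st.2)))
    (PySem.Dict.empty, PySem.Set.empty)

-- body of B's loop over sorted(available); state = (total, last, picks)
def pvB_step (m k : Int) (first : PySem.Dict Int Int) (c : List Int)
    (st : Int × Option Int × Int) (v : Int) : Int × Option Int × Int :=
  if m ≤ st.2.2 then st
  else
    if (match st.2.1 with
        | none => true
        | some l => decide (k ≤ v - l)) = true then
      (st.1 + PySem.List.pyGetD c (first.getD v 0) 0, some v, st.2.2 + 1)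
    else st

def max_balanced_size_alt (n : Int) (m : Int) (k : Int) (a : List Int) (c : List Int) : Int :=
  let fd := pvB_loops n a c
  ((PySem.List.sorted fd.2 (fun x => x)).foldl (pvB_step m k fd.1 c) (0, none, 0)).1

-- ===== PRECONDITION & SPEC =====
-- Pre_ excludes n > len(a) or n > len(c) (A raises IndexError there) and nonpositive
-- spacing k unless no value can have two copies (distinct values with counts ≤ 1):
-- with k ≤ 0 and a repeated copy A picks the same value again and again, an artefact
-- of its expansion outside the problem's natural domain (the task has k ≥ 1).
def Pre_max_balanced_size (n : Int) (m : Int) (k : Int) (a : List Int) (c : List Int) : Prop :=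
  n ≤ (a.length : Int) ∧ n ≤ (c.length : Int) ∧
    (1 ≤ k ∨ ((a.take n.toNat).Nodup ∧ ∀ x ∈ c.take n.toNat, x ≤ 1))
instance (n : Int) (m : Int) (k : Int) (a : List Int) (c : List Int) : Decidable (Pre_max_balanced_size n m k a c) := by unfold Pre_max_balanced_size; infer_instance

def pvWitness_max_balanced_size : Int × Int × Int × List Int × List Int := (2, 2, 1, [1, 2], [3, 4])

def Spec_max_balanced_size (n : Int) (m : Int) (k : Int) (a : List Int) (c : List Int) (out : Int) : Prop := out = max_balanced_size_alt n m k a c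
instance (n : Int) (m : Int) (k : Int) (a : List Int) (c : List Int) (out : Int) : Decidable (Spec_max_balanced_size n m k a c out) := by unfold Spec_max_balanced_size; infer_instance

-- ===== CLAIM (what is proved, stated in full; the proofs are below) =====
def Claim_equal_max_balanced_size : Prop := ∀ (n : Int) (m : Int) (k : Int) (a : List Int) (c : List Int), Dom_max_balanced_size n m k a c → Pre_max_balanced_size n m k a c → Spec_max_balanced_size n m k a c (max_balanced_size n m k a c)

-- ===== LEMMAS AND PROOFS =====

-- the pair stream (a[i], c[i]) for i in range(n)
def pvPs (n : Int) (a c : List Int) : List (Int × Int) :=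
  (PySem.List.pyRange 0 n 1).map (fun i => (PySem.List.pyGetD a i 0, PySem.List.pyGetD c i 0))

-- the pair stream (a[i], i) for i in range(n)
def pvQs (n : Int) (a : List Int) : List (Int × Int) :=
  (PySem.List.pyRange 0 n 1).map (fun i => (PySem.List.pyGetD a i 0, i))

def pvMultStep (d : PySem.Dict Int Int) (p : Int × Int) : PySem.Dict Int Int :=
  d.insert p.1 (d.getD p.1 0 + max p.2 0)

def pvFirstStep (d : PySem.Dict Int Int) (p : Int × Int) : PySem.Dict Int Int :=
  if d.contains p.1 then d else d.insert p.1 p.2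

def pvAvailStep (s : PySem.Set Int) (p : Int × Int) : PySem.Set Int :=
  if 0 < p.2 then PySem.Set.add s p.1 else s

def pvExpand (ps : List (Int × Int)) : List Int :=
  ps.flatMap (fun p => List.replicate p.2.toNat p.1)

-- abstract form of A's loop body: state = (max_size, last appended, number appended)
def pvStepA (m k : Int) (co : Int → Int) (st : Int × Option Int × Int) (x : Int) :
    Int × Option Int × Int :=
  if (match st.2.1 with
      | none => true
      | some lastv => decide (k ≤ x - lastv)) = true then
    if st.2.2 < m then (st.1 + co x, some x, st.2.2 + 1) else st
  else st

-- A's grouped loop: one step per distinct value, guarded by availability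
def pvG_step (m k : Int) (mult : PySem.Dict Int Int) (co : Int → Int)
    (st : Int × Option Int × Int) (v : Int) : Int × Option Int × Int :=
  if m ≤ st.2.2 then st
  else
    if 0 < mult.getD v 0 ∧ (match st.2.1 with
        | none => true
        | some l => decide (k ≤ v - l)) = true then
      (st.1 + co v, some v, st.2.2 + 1)
    else st

theorem pvA_build_eq (n : Int) (a c : List Int) : pvA_build n a c = pvExpand (pvPs n a c) := by
  unfold pvA_build pvExpand pvPs
  rw [PySem.List.foldl_append_eq_flatMap
    (g := fun i => List.replicate (PySem.List.pyGetD c i 0).toNat (PySem.List.pyGetD a i 0))]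
  simp [List.flatMap_map]

theorem pvB_loops_eq (n : Int) (a c : List Int) :
    pvB_loops n a c =
      ((pvQs n a).foldl pvFirstStep PySem.Dict.empty,
       (pvPs n a c).foldl pvAvailStep PySem.Set.empty) := by
  unfold pvB_loops pvQs pvPs pvFirstStep pvAvailStep
  rw [PySem.List.foldl_prod_mk
    (f := fun (d : PySem.Dict Int Int) i =>
      if d.contains (PySem.List.pyGetD a i 0) then d
      else d.insert (PySem.List.pyGetD a i 0) i)
    (g := fun (s : PySem.Set Int) i =>
      if 0 < PySem.List.pyGetD c i 0 then PySem.Set.add s (PySem.List.pyGetD a i 0) else s)]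
  rw [List.foldl_map, List.foldl_map]

theorem pvMult_getD (ps : List (Int × Int)) (d : PySem.Dict Int Int) (v : Int) :
    (ps.foldl pvMultStep d).getD v 0 =
      d.getD v 0 + ((ps.filter (fun p => p.1 == v)).map (fun p => max p.2 0)).sum := by
  induction ps generalizing d with
  | nil => simp
  | cons p rest ih =>
    simp only [List.foldl_cons, List.filter_cons]
    rw [ih]
    by_cases hv : p.1 = v
    · simp only [hv, BEq.rfl, if_pos, List.map_cons, List.sum_cons]
      rw [pvMultStep, hv, PySem.Dict.getD_insert_self]
      ring
    · have : (p.1 == v) = false := by simp [hv]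
      simp only [this, Bool.false_eq_true, if_false]
      rw [pvMultStep, PySem.Dict.getD_insert_of_ne _ _ _ (fun h => hv h.symm)]

theorem pvFirst_get? (ps : List (Int × Int)) (d : PySem.Dict Int Int) (v : Int) :
    (ps.foldl pvFirstStep d).get? v =
      (d.get? v).or (((ps.find? (fun p => p.1 == v)).map Prod.snd)) := by
  induction ps generalizing d with
  | nil => simp
  | cons p rest ih =>
    simp only [List.foldl_cons, List.find?_cons]
    rw [ih]
    by_cases hv : p.1 = v
    · simp only [hv, BEq.rfl]
      rw [pvFirstStep]
      by_cases hc : d.contains p.1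
      · rw [if_pos hc]
        rcases hg : d.get? v with _ | w
        · rw [hv] at hc
          rw [PySem.Dict.get?_eq_none_iff_contains] at hg
          simp [hc] at hg
        · simp [hg]
      · rw [if_neg hc, hv, PySem.Dict.get?_insert_self]
        rw [hv] at hc
        have : d.get? v = none := by
          rw [PySem.Dict.get?_eq_none_iff_contains]
          simpa using hc
        simp [this]
    · have hb : (p.1 == v) = false := by simp [hv]
      simp only [hb]
      rw [pvFirstStep]
      by_cases hc : d.contains p.1
      · rw [if_pos hc]
      · rw [if_neg hc, PySem.Dict.get?_insert_of_ne _ _ (fun h => hv h.symm)]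

theorem pvMult_keys (ps : List (Int × Int)) :
    (ps.foldl pvMultStep PySem.Dict.empty).keys = PySem.Set.ofList (ps.map Prod.fst) := by
  have h := PySem.Dict.keys_foldl_insert_key (l := ps) (key := Prod.fst)
    (f := fun d p => d.getD p.1 0 + max p.2 0) (d := (PySem.Dict.empty : PySem.Dict Int Int))
  simpa [pvMultStep, PySem.Dict.keys_empty, PySem.Set.update_nil_left] using h

theorem pvCount_expand (ps : List (Int × Int)) (v : Int) :
    (pvExpand ps).count v = ((ps.filter (fun p => p.1 == v)).map (fun p => p.2.toNat)).sum := by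
  induction ps with
  | nil => simp [pvExpand]
  | cons p rest ih =>
    simp only [pvExpand, List.flatMap_cons, List.count_append, List.filter_cons] at *
    rw [ih, List.count_replicate]
    by_cases hv : p.1 = v
    · simp [hv]
    · have hb : (p.1 == v) = false := by simp [hv]
      simp [hb]

theorem pvMult_count (ps : List (Int × Int)) (v : Int) :
    (ps.foldl pvMultStep PySem.Dict.empty).getD v 0 = ((pvExpand ps).count v : Int) := by
  rw [pvMult_getD, pvCount_expand, PySem.Dict.getD_empty, zero_add]
  generalize ps.filter (fun p => p.1 == v) = l
  induction l with
  | nil => simp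
  | cons p rest ih =>
    simp only [List.map_cons, List.sum_cons, ih]
    push_cast
    rw [Int.toNat_eq_max]

-- the dictionary entry is positive exactly when some occurrence has a positive count
theorem pvMult_pos_iff (ps : List (Int × Int)) (v : Int) :
    0 < (ps.foldl pvMultStep PySem.Dict.empty).getD v 0 ↔ ∃ p ∈ ps, p.1 = v ∧ 0 < p.2 := by
  rw [pvMult_getD, PySem.Dict.getD_empty, zero_add]
  induction ps with
  | nil => simp
  | cons p rest ih =>
    rw [List.filter_cons]
    by_cases hv : p.1 = v
    · have hb : (p.1 == v) = true := by simp [hv]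
      simp only [hb, if_pos, List.map_cons, List.sum_cons, List.mem_cons]
      have hnn : 0 ≤ ((rest.filter (fun p => p.1 == v)).map (fun p => max p.2 0)).sum := by
        apply List.sum_nonneg
        intro x hx
        obtain ⟨q, _, rfl⟩ := List.mem_map.mp hx
        exact le_max_right _ _
      constructor
      · intro h
        by_cases hp : 0 < p.2
        · exact ⟨p, Or.inl rfl, hv, hp⟩
        · have : max p.2 0 = 0 := by omega
          rw [this, zero_add] at h
          obtain ⟨q, hq, hq1, hq2⟩ := ih.mp h
          exact ⟨q, Or.inr hq, hq1, hq2⟩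
      · rintro ⟨q, hq | hq, hq1, hq2⟩
        · subst hq; omega
        · have := ih.mpr ⟨q, hq, hq1, hq2⟩
          omega
    · have hb : (p.1 == v) = false := by simp [hv]
      simp only [hb, Bool.false_eq_true, if_false, List.mem_cons]
      rw [ih]
      constructor
      · rintro ⟨q, hq, hq1, hq2⟩; exact ⟨q, Or.inr hq, hq1, hq2⟩
      · rintro ⟨q, hq | hq, hq1, hq2⟩
        · subst hq; exact absurd hq1 hv
        · exact ⟨q, hq, hq1, hq2⟩

-- membership in the availability set
theorem pvAvail_mem (ps : List (Int × Int)) (s : PySem.Set Int) (v : Int) :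
    v ∈ ps.foldl pvAvailStep s ↔ v ∈ s ∨ ∃ p ∈ ps, p.1 = v ∧ 0 < p.2 := by
  induction ps generalizing s with
  | nil => simp
  | cons p rest ih =>
    simp only [List.foldl_cons, List.mem_cons]
    rw [ih]
    unfold pvAvailStep
    by_cases hp : 0 < p.2
    · rw [if_pos hp, PySem.Set.mem_add]
      constructor
      · rintro ((h | h) | h)
        · exact Or.inl h
        · exact Or.inr ⟨p, Or.inl rfl, h.symm, hp⟩
        · obtain ⟨q, hq, hq1, hq2⟩ := h
          exact Or.inr ⟨q, Or.inr hq, hq1, hq2⟩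
      · rintro (h | ⟨q, hq | hq, hq1, hq2⟩)
        · exact Or.inl (Or.inl h)
        · subst hq; exact Or.inl (Or.inr hq1.symm)
        · exact Or.inr ⟨q, hq, hq1, hq2⟩
    · rw [if_neg hp]
      constructor
      · rintro (h | ⟨q, hq, hq1, hq2⟩)
        · exact Or.inl h
        · exact Or.inr ⟨q, Or.inr hq, hq1, hq2⟩
      · rintro (h | ⟨q, hq | hq, hq1, hq2⟩)
        · exact Or.inl h
        · subst hq; exact absurd hq2 hp
        · exact Or.inr ⟨q, hq, hq1, hq2⟩

theorem pvAvail_nodup (ps : List (Int × Int)) (s : PySem.Set Int) (hs : s.Nodup) :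
    (ps.foldl pvAvailStep s).Nodup := by
  induction ps generalizing s with
  | nil => exact hs
  | cons p rest ih =>
    rw [List.foldl_cons]
    apply ih
    unfold pvAvailStep
    split
    · exact PySem.Set.nodup_add _ _ hs
    · exact hs

theorem pvCount_flatMap_rep (vs : List Int) (g : Int → Nat) (v : Int) (h : vs.Nodup) :
    (vs.flatMap (fun w => List.replicate (g w) w)).count v = if v ∈ vs then g v else 0 := by
  induction vs with
  | nil => simp
  | cons w rest ih =>
    rw [List.nodup_cons] at h
    simp only [List.flatMap_cons, List.count_append, List.count_replicate, ih h.2]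
    by_cases hv : v = w
    · subst hv
      simp [h.1]
    · have hb : (w == v) = false := beq_eq_false_iff_ne.mpr (fun h => hv h.symm)
      simp [hb, hv, List.mem_cons]

theorem pvPairwise_flatMap_rep (vs : List Int) (g : Int → Nat) (h : vs.Pairwise (· < ·)) :
    (vs.flatMap (fun w => List.replicate (g w) w)).Pairwise (· ≤ ·) := by
  induction vs with
  | nil => simp
  | cons w rest ih =>
    rw [List.pairwise_cons] at h
    simp only [List.flatMap_cons]
    rw [List.pairwise_append]
    refine ⟨List.pairwise_replicate.mpr (Or.inr le_rfl), ih h.2, ?_⟩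
    intro x hx y hy
    obtain rfl := List.eq_of_mem_replicate hx
    obtain ⟨w', hw', hy'⟩ := List.mem_flatMap.mp hy
    have hyw : y = w' := List.eq_of_mem_replicate hy'
    exact hyw ▸ le_of_lt (h.1 w' hw')

-- the sorted distinct values of ps are strictly increasing
theorem pvVs_pairwise (ps : List (Int × Int)) :
    (PySem.List.sorted (ps.foldl pvMultStep PySem.Dict.empty).keys (fun x => x)).Pairwise
      (· < ·) := by
  have hnd : (ps.foldl pvMultStep PySem.Dict.empty).keys.Nodup := by
    rw [pvMult_keys]; exact PySem.Set.nodup_ofList _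
  have hnd' := (PySem.List.sorted_perm (ps.foldl pvMultStep PySem.Dict.empty).keys
    (fun x => x) false).nodup_iff.mpr hnd
  have hle := PySem.List.sorted_pairwise (ps.foldl pvMultStep PySem.Dict.empty).keys
    (fun x => x)
  exact (hle.and hnd').imp (fun h => lt_of_le_of_ne h.1 h.2)

theorem pvVs_mem (ps : List (Int × Int)) (v : Int) :
    v ∈ PySem.List.sorted (ps.foldl pvMultStep PySem.Dict.empty).keys (fun x => x) ↔
      v ∈ ps.map Prod.fst := by
  rw [(PySem.List.sorted_perm (ps.foldl pvMultStep PySem.Dict.empty).keys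
    (fun x => x) false).mem_iff, pvMult_keys]
  exact PySem.Set.mem_ofList _ _

-- sorted b regrouped by distinct value
theorem pvSorted_expand (ps : List (Int × Int)) :
    PySem.List.sorted (pvExpand ps) (fun x => x) =
      (PySem.List.sorted (ps.foldl pvMultStep PySem.Dict.empty).keys (fun x => x)).flatMap
        (fun v => List.replicate ((ps.foldl pvMultStep PySem.Dict.empty).getD v 0).toNat v) := by
  apply PySem.List.sorted_id_eq_of_perm_of_pairwise
  · rw [List.perm_iff_count]
    intro v
    have hnd : (PySem.List.sorted (ps.foldl pvMultStep PySem.Dict.empty).keys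
        (fun x => x)).Nodup := (pvVs_pairwise ps).nodup
    rw [pvCount_flatMap_rep _ _ _ hnd]
    by_cases hv : v ∈ ps.map Prod.fst
    · rw [if_pos ((pvVs_mem ps v).mpr hv)]
      have := pvMult_count ps v
      omega
    · rw [if_neg (fun h => hv ((pvVs_mem ps v).mp h))]
      rw [pvCount_expand]
      have : ps.filter (fun p => p.1 == v) = [] := by
        rw [List.filter_eq_nil_iff]
        intro p hp hb
        exact hv (List.mem_map.mpr ⟨p, hp, by simpa using hb⟩)
      simp [this]
  · exact pvPairwise_flatMap_rep _ _ (pvVs_pairwise ps)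

-- A's loop only depends on (max_size, last element, length) of its state
theorem pvA_fold_abs (m k : Int) (a c : List Int) (bs : List Int) (ms : Int) (seqs : List Int) :
    (bs.foldl (pvA_step m k a c) (ms, seqs)).1 =
      (bs.foldl (pvStepA m k (pvA_cost a c)) (ms, seqs.getLast?, (seqs.length : Int))).1 := by
  have h := List.foldl_hom
    (f := fun (st : Int × List Int) => (st.1, st.2.getLast?, (st.2.length : Int)))
    (g₁ := pvA_step m k a c) (g₂ := pvStepA m k (pvA_cost a c)) (l := bs) (init := (ms, seqs)) ?_
  · exact (congrArg Prod.fst h).symm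
  · intro st x
    rcases st with ⟨ms', seqs'⟩
    unfold pvA_step pvStepA
    simp only [ite_self]
    rcases hL : seqs'.getLast? with _ | lastv
    · simp only
      by_cases hlen : (seqs'.length : Int) < m
      · simp [hlen]
      · simp [hlen, hL]
    · simp only
      by_cases hg : k ≤ x - lastv
      · by_cases hlen : (seqs'.length : Int) < m
        · simp [hg, hlen]
        · simp [hg, hlen, hL]
      · simp [hg, hL]

theorem pvStepA_congr (m k : Int) (co co' : Int → Int) (bs : List Int) (st : Int × Option Int × Int)
    (h : ∀ x ∈ bs, co x = co' x) :
    bs.foldl (pvStepA m k co) st = bs.foldl (pvStepA m k co') st := by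
  apply PySem.List.foldl_congr_mem
  intro acc x hx
  unfold pvStepA
  rw [h x hx]

theorem pvFoldl_replicate_fix {σ : Type} (f : σ → Int → σ) (st : σ) (v : Int) (t : Nat)
    (h : f st v = st) : (List.replicate t v).foldl f st = st := by
  induction t with
  | zero => rfl
  | succ t ih => rw [List.replicate_succ, List.foldl_cons, h, ih]

-- k > 0: processing all copies of v does what one application does
theorem pvGrp_gt (m k : Int) (co : Int → Int) (hk : 0 < k) (t : Nat) (v : Int)
    (st : Int × Option Int × Int) :
    (List.replicate t v).foldl (pvStepA m k co) st =
      if 0 < t then pvStepA m k co st v else st := by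
  cases t with
  | zero => simp
  | succ t =>
    rw [if_pos (Nat.succ_pos t), List.replicate_succ, List.foldl_cons]
    apply pvFoldl_replicate_fix
    rcases st with ⟨ms, last, cnt⟩
    show pvStepA m k co (pvStepA m k co (ms, last, cnt) v) v = pvStepA m k co (ms, last, cnt) v
    unfold pvStepA
    have hkv : ¬ k ≤ v - v := by omega
    rcases last with _ | l
    · by_cases hc : cnt < m
      · simp only [decide_eq_true_eq, hc, if_pos, if_neg hkv]
      · simp [hc]
    · by_cases hg : k ≤ v - l
      · by_cases hc : cnt < m
        · simp only [hg, decide_true, decide_eq_true_eq, hc, if_pos, if_neg hkv]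
        · simp [hg, hc]
      · simp [hg]

-- a group of at most one copy also collapses to one step, for any k
theorem pvGrp (m k : Int) (co : Int → Int) (t : Nat) (v : Int)
    (st : Int × Option Int × Int) (h : 0 < k ∨ t ≤ 1) :
    (List.replicate t v).foldl (pvStepA m k co) st =
      if 0 < t then pvStepA m k co st v else st := by
  match t, h with
  | 0, _ => simp
  | 1, _ => simp [List.replicate]
  | t + 2, Or.inl hk => exact pvGrp_gt m k co hk (t + 2) v st

-- A's fold over the regrouped multiset is the grouped greedy over the distinct values
theorem pvFold_grp (m k : Int) (mult : PySem.Dict Int Int) (co : Int → Int) (vs : List Int)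
    (hk : ∀ v ∈ vs, 0 < k ∨ mult.getD v 0 ≤ 1)
    (st : Int × Option Int × Int) :
    (vs.flatMap (fun v => List.replicate (mult.getD v 0).toNat v)).foldl
        (pvStepA m k co) st =
      vs.foldl (pvG_step m k mult co) st := by
  rw [List.foldl_flatMap]
  apply PySem.List.foldl_congr_mem
  intro acc v hv
  rw [pvGrp m k _ _ v acc ((hk v hv).imp_right (by omega))]
  have h0 : (0 < (mult.getD v 0).toNat) ↔ 0 < mult.getD v 0 := by omega
  rcases acc with ⟨ms, last, cnt⟩
  unfold pvStepA pvG_step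
  by_cases hmv : 0 < mult.getD v 0
  · rw [if_pos (h0.mpr hmv)]
    by_cases hc : cnt < m
    · have hc' : ¬ m ≤ cnt := by omega
      rcases last with _ | l
      · simp [hc, hc', hmv]
      · by_cases hg : k ≤ v - l
        · simp [hc, hc', hmv, hg]
        · simp [hc', hg]
    · have hc' : m ≤ cnt := by omega
      rcases last with _ | l
      · simp [hc, hc']
      · by_cases hg : k ≤ v - l <;> simp [hc, hc', hg]
  · rw [if_neg (fun h => hmv (h0.mp h))]
    by_cases hc : m ≤ cnt
    · simp [hc]
    · simp [hc, hmv]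

-- the grouped greedy is B's loop over the availability-filtered values
theorem pvFold_filter (m k : Int) (mult first : PySem.Dict Int Int) (c : List Int) (vs : List Int)
    (st : Int × Option Int × Int) :
    vs.foldl (pvG_step m k mult (fun v => PySem.List.pyGetD c (first.getD v 0) 0)) st =
      (vs.filter (fun v => decide (0 < mult.getD v 0))).foldl (pvB_step m k first c) st := by
  rw [List.foldl_filter]
  apply PySem.List.foldl_congr_mem
  intro acc v _
  rcases acc with ⟨ms, last, cnt⟩
  by_cases hmv : 0 < mult.getD v 0
  · have hb : decide (0 < mult.getD v 0) = true := by simpa using hmv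
    rw [hb, if_pos rfl]
    unfold pvG_step pvB_step
    by_cases hc : m ≤ cnt
    · simp [hc]
    · rcases last with _ | l
      · simp [hc, hmv]
      · by_cases hg : k ≤ v - l <;> simp [hc, hmv, hg]
  · have hb : decide (0 < mult.getD v 0) = false := by simpa using hmv
    rw [hb]
    simp only [Bool.false_eq_true, if_false]
    unfold pvG_step
    by_cases hc : m ≤ cnt
    · simp [hc]
    · simp [hc, hmv]

-- sorted(available) is the availability-filtered sorted distinct-value list
theorem pvSorted_avail (ps : List (Int × Int)) :
    PySem.List.sorted (ps.foldl pvAvailStep PySem.Set.empty) (fun x => x) =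
      (PySem.List.sorted (ps.foldl pvMultStep PySem.Dict.empty).keys (fun x => x)).filter
        (fun v => decide (0 < (ps.foldl pvMultStep PySem.Dict.empty).getD v 0)) := by
  apply PySem.List.sorted_id_eq_of_perm_of_pairwise
  · rw [List.perm_ext_iff_of_nodup
      ((pvVs_pairwise ps).nodup.filter _)
      (pvAvail_nodup ps PySem.Set.empty (by simp [PySem.Set.empty]))]
    intro v
    rw [List.mem_filter, pvAvail_mem, pvVs_mem, decide_eq_true_eq, pvMult_pos_iff]
    constructor
    · rintro ⟨hmem, q, hq, hq1, hq2⟩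
      exact Or.inr ⟨q, hq, hq1, hq2⟩
    · rintro (h | ⟨q, hq, hq1, hq2⟩)
      · exact absurd h (by simp [PySem.Set.empty])
      · exact ⟨List.mem_map.mpr ⟨q, hq, hq1⟩, q, hq, hq1, hq2⟩
  · exact ((pvVs_pairwise ps).filter _).imp le_of_lt

-- the second components of the pair stream are exactly c[:n]
theorem pvPs_map_snd (n : Int) (a c : List Int) (h2 : n ≤ (c.length : Int)) :
    (pvPs n a c).map Prod.snd = c.take n.toNat := by
  unfold pvPs
  rw [List.map_map, PySem.List.pyRange_one, List.map_map]
  apply List.ext_getElem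
  · simp
    omega
  · intro i hi hi'
    simp only [List.getElem_map, Function.comp_apply, List.getElem_range, List.getElem_take]
    have hlen : i < (n - 0).toNat := by simpa using hi
    rw [zero_add, PySem.List.pyGetD_eq_getElem c 0 (by positivity) (by push_cast; omega)]
    simp

-- the first components of the pair stream are exactly a[:n]
theorem pvPs_map_fst (n : Int) (a c : List Int) (h1 : n ≤ (a.length : Int)) :
    (pvPs n a c).map Prod.fst = a.take n.toNat := by
  unfold pvPs
  rw [List.map_map, PySem.List.pyRange_one, List.map_map]
  apply List.ext_getElem
  · simp
    omega
  · intro i hi hi'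
    simp only [List.getElem_map, Function.comp_apply, List.getElem_range, List.getElem_take]
    have hlen : i < (n - 0).toNat := by simpa using hi
    rw [zero_add, PySem.List.pyGetD_eq_getElem a 0 (by positivity) (by push_cast; omega)]
    simp

-- with pairwise-distinct first components the filter is the first (only) match
theorem pvFilter_nodup (ps : List (Int × Int)) (h : (ps.map Prod.fst).Nodup) (v : Int) :
    ps.filter (fun p => p.1 == v) = (ps.find? (fun p => p.1 == v)).toList := by
  induction ps with
  | nil => simp
  | cons p rest ih =>
    rw [List.map_cons, List.nodup_cons] at h
    rw [List.filter_cons, List.find?_cons]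
    by_cases hv : p.1 = v
    · have hb : (p.1 == v) = true := by simp [hv]
      simp only [hb, if_pos]
      have hrest : rest.filter (fun p => p.1 == v) = [] := by
        rw [List.filter_eq_nil_iff]
        intro q hq hbq
        have : q.1 = v := by simpa using hbq
        exact h.1 (by rw [hv, ← this]; exact List.mem_map_of_mem hq)
      simp [hrest]
    · have hb : (p.1 == v) = false := by simp [hv]
      simp only [hb, Bool.false_eq_true, if_false]
      exact ih h.2

-- distinct values with counts ≤ 1 bound every dictionary entry by 1
theorem pvMult_le_one (ps : List (Int × Int)) (hnd : (ps.map Prod.fst).Nodup)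
    (h : ∀ p ∈ ps, p.2 ≤ 1) (v : Int) :
    (ps.foldl pvMultStep PySem.Dict.empty).getD v 0 ≤ 1 := by
  rw [pvMult_getD, PySem.Dict.getD_empty, zero_add, pvFilter_nodup ps hnd]
  cases hf : ps.find? (fun p => p.1 == v) with
  | none => simp
  | some p =>
    have hp : p ∈ ps := List.mem_of_find?_eq_some hf
    have := h p hp
    simp only [Option.toList_some, List.map_cons, List.map_nil, List.sum_cons, List.sum_nil,
      add_zero]
    omega

-- under Pre_, A's repeated c[a.index(x)] equals B's first-position lookup
theorem pvCost_agree (n : Int) (a c : List Int) (h1 : n ≤ (a.length : Int))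
    (x : Int) (hx : x ∈ pvExpand (pvPs n a c)) :
    pvA_cost a c x =
      PySem.List.pyGetD c (((pvQs n a).foldl pvFirstStep PySem.Dict.empty).getD x 0) 0 := by
  obtain ⟨p, hp, hxp⟩ := List.mem_flatMap.mp hx
  obtain rfl := List.eq_of_mem_replicate hxp
  obtain ⟨i, hi, hpi⟩ := List.mem_map.mp hp
  obtain ⟨hi0, hin⟩ := PySem.List.mem_pyRange_one.mp hi
  have hia : i < (a.length : Int) := lt_of_lt_of_le hin h1
  have hxa : p.1 = a[i.toNat] := by
    rw [← hpi]
    exact PySem.List.pyGetD_eq_getElem a 0 hi0 hia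
  have hxmem : p.1 ∈ a := hxa ▸ List.getElem_mem _
  obtain ⟨j0, hj0⟩ := Option.isSome_iff_exists.mp ((PySem.List.index?_isSome_iff a p.1).mpr hxmem)
  obtain ⟨hkl, hval, hmin⟩ := PySem.List.getElem_of_index?_eq_some hj0
  have hj0i : j0 ≤ i.toNat := by
    by_contra hcon
    exact hmin i.toNat (by omega) hxa.symm
  have hj0n : (j0 : Int) < n := by omega
  -- left side: c[a.index(x)] = c[j0]
  rw [pvA_cost, hj0]
  simp only [Option.getD_some]
  -- right side: the first-position dictionary holds the index found first in qs
  rw [PySem.Dict.getD_eq_get?_getD, pvFirst_get?, PySem.Dict.get?_empty, Option.none_or]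
  unfold pvQs
  rw [List.find?_map]
  have hsplit : PySem.List.pyRange 0 n 1 =
      PySem.List.pyRange 0 (j0 : Int) 1 ++ PySem.List.pyRange (j0 : Int) n 1 :=
    PySem.List.pyRange_one_append 0 (j0 : Int) n (by omega) (by omega)
  rw [hsplit, List.find?_append]
  have hnone : (PySem.List.pyRange 0 (j0 : Int) 1).find?
      ((fun q => q.1 == p.1) ∘ fun i => (PySem.List.pyGetD a i 0, i)) = none := by
    rw [List.find?_eq_none]
    intro i' hi'
    obtain ⟨h0', h1'⟩ := PySem.List.mem_pyRange_one.mp hi'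
    simp only [Function.comp_apply]
    rw [PySem.List.pyGetD_eq_getElem a 0 h0' (by omega)]
    simp only [beq_iff_eq]
    exact hmin i'.toNat (by omega)
  have hcons : PySem.List.pyRange (j0 : Int) n 1 =
      (j0 : Int) :: PySem.List.pyRange ((j0 : Int) + 1) n 1 :=
    PySem.List.pyRange_one_cons (by omega)
  have hpj : ((fun q => q.1 == p.1) ∘
      fun i => (PySem.List.pyGetD a i 0, i)) ((j0 : Int)) = true := by
    simp only [Function.comp_apply]
    rw [PySem.List.pyGetD_eq_getElem a 0 (by omega) (by omega)]
    simp only [beq_iff_eq, Int.toNat_natCast]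
    exact hval
  rw [hnone, hcons, List.find?_cons, hpj]
  simp

-- ===== VERDICT (by name: the statement is the Claim_ definition above) =====
theorem max_balanced_size_spec : Claim_equal_max_balanced_size := by
  unfold Claim_equal_max_balanced_size
  intro n m k a c hdom hpre
  obtain ⟨h1, h2, hk⟩ := hpre
  unfold Spec_max_balanced_size
  simp only [max_balanced_size, max_balanced_size_alt, pvB_loops_eq]
  rw [pvA_build_eq, pvSorted_expand]
  rw [pvA_fold_abs m k a c _ 0 []]
  simp only [List.getLast?_nil, List.length_nil, Nat.cast_zero]
  rw [pvStepA_congr m k (pvA_cost a c)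
    (fun v => PySem.List.pyGetD c
      (((pvQs n a).foldl pvFirstStep PySem.Dict.empty).getD v 0) 0) _ _
    (by
      intro x hx
      apply pvCost_agree n a c h1 x
      rw [← PySem.List.mem_sorted (pvExpand (pvPs n a c)) (fun x => x) false x,
        pvSorted_expand]
      exact hx)]
  rw [pvFold_grp m k ((pvPs n a c).foldl pvMultStep PySem.Dict.empty) _ _
    (by
      intro v _
      rcases hk with hk | ⟨hnda, hc1⟩
      · exact Or.inl (by omega)
      · refine Or.inr (pvMult_le_one _ ?_ ?_ v)
        · rw [pvPs_map_fst n a c h1]; exact hnda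
        · intro p hp
          apply hc1
          rw [← pvPs_map_snd n a c h2]
          exact List.mem_map_of_mem hp)]
  rw [pvFold_filter, ← pvSorted_avail]
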